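-- pv_equiv track=rewrite | github.com/yuanxiaochenAC/EvoAgentX | evoagentx/frameworks/multi_agent_debate/utils.py | default_personas
-- ===== SOURCE A (Python) =====
-- from typing import List, Dict, Any
--
-- def default_personas(num_agents: int) -> List[str]:
--     """Return default personas in English."""
--     base_roles = [
--         "Rigorous statistician, emphasizes falsifiability and counterexamples",
--         "Pragmatic engineer, focuses on executable plans and edge cases",
--         "Devil's advocate, challenges assumptions and proposes alternatives",
--         "Knowledge graph expert, stresses structured evidence and provenance",
--         "Intuition-driven heuristic scorer, provides quick scoring and heuristics",
--     ]
--     roles: List[str] = []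
--     for i in range(num_agents):
--         roles.append(base_roles[i % len(base_roles)])
--     return roles
-- ===== SOURCE B (Python) =====
-- from typing import List
--
-- def default_personas(num_agents: int) -> List[str]:
--     """Return default personas in English (tile-then-truncate)."""
--     base_roles = [
--         "Rigorous statistician, emphasizes falsifiability and counterexamples",
--         "Pragmatic engineer, focuses on executable plans and edge cases",
--         "Devil's advocate, challenges assumptions and proposes alternatives",
--         "Knowledge graph expert, stresses structured evidence and provenance",
--         "Intuition-driven heuristic scorer, provides quick scoring and heuristics",
--     ]
--     reps = num_agents // len(base_roles) + 1
--     return (base_roles * reps)[:num_agents]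
-- ===== Notes on version B (the rewrite author's own statement) =====
-- stated objective: simpler
-- what changed: B replaces the per-index loop with modulo indexing by tiling the base list (list repetition) and truncating it with a slice.
import Mathlib
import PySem

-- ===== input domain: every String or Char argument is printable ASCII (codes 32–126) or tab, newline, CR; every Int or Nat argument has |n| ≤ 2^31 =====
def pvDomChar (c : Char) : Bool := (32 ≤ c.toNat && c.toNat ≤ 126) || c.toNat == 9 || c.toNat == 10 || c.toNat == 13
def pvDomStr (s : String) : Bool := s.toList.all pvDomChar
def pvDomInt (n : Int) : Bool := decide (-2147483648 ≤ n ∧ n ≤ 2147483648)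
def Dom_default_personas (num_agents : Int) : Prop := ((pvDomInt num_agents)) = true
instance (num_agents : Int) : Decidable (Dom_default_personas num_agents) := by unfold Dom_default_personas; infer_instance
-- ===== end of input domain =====

-- B builds the list by tiling the base list and truncating with a slice instead of A's
-- per-index loop with modulo indexing (objective: simpler).

-- ===== PORT A =====
def pvBaseRoles : List String := [
  "Rigorous statistician, emphasizes falsifiability and counterexamples",
  "Pragmatic engineer, focuses on executable plans and edge cases",
  "Devil's advocate, challenges assumptions and proposes alternatives",
  "Knowledge graph expert, stresses structured evidence and provenance",
  "Intuition-driven heuristic scorer, provides quick scoring and heuristics"]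

-- the index i % len(base_roles) is always in range, so pyGetD is exact here
def default_personas (num_agents : Int) : List String :=
  (PySem.List.pyRange 0 num_agents 1).foldl
    (fun roles i =>
      roles ++ [PySem.List.pyGetD pvBaseRoles (PySem.Int.mod i (pvBaseRoles.length : Int)) ""])
    []

-- ===== PORT B =====
-- Python's 'base_roles * reps' with reps ≤ 0 is []; reps.toNat matches that
def default_personas_alt (num_agents : Int) : List String :=
  let reps := PySem.Int.floordiv num_agents (pvBaseRoles.length : Int) + 1
  PySem.List.slice (List.flatten (List.replicate reps.toNat pvBaseRoles)) none (some num_agents)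

-- ===== PRECONDITION & SPEC =====
def Spec_default_personas (num_agents : Int) (out : List String) : Prop := out = default_personas_alt num_agents
instance (num_agents : Int) (out : List String) : Decidable (Spec_default_personas num_agents out) := by unfold Spec_default_personas; infer_instance

-- ===== CLAIM (what is proved, stated in full; the proofs are below) =====
def Claim_equal_default_personas : Prop := ∀ (num_agents : Int), Dom_default_personas num_agents → Spec_default_personas num_agents (default_personas num_agents)

-- ===== LEMMAS AND PROOFS =====

-- closed form both sides are reduced to
def pvModel (m : Nat) : List String := (List.range m).map (fun j => pvBaseRoles.getD (j % 5) "")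

lemma pvTile (K : Nat) :
    List.flatten (List.replicate K pvBaseRoles) = pvModel (5 * K) := by
  induction K with
  | zero => simp [pvModel]
  | succ k ih =>
      rw [List.replicate_succ', List.flatten_append]
      have h5 : 5 * (k + 1) = 5 * k + 5 := by ring
      rw [ih, pvModel, pvModel, h5, List.range_add, List.map_append]
      congr 1
      simp [List.range_succ, pvBaseRoles, Nat.add_mod]

lemma pvA_model (n : Int) : default_personas n = pvModel n.toNat := by
  unfold default_personas
  rw [PySem.List.foldl_append_singleton_eq_map]
  rcases (show n ≤ 0 ∨ 0 < n by omega) with h | h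
  · have : PySem.List.pyRange 0 n 1 = [] := by
      simp [PySem.List.pyRange]; omega
    simp [this, pvModel]
    omega
  · obtain ⟨m, rfl⟩ : ∃ m : Nat, n = (m : Int) := ⟨n.toNat, by omega⟩
    rw [PySem.List.pyRange_zero_natCast, List.map_map]
    unfold pvModel
    simp only [Int.toNat_natCast]
    apply List.map_congr_left
    intro j _
    have hmod : PySem.Int.mod (j : Int) ((pvBaseRoles.length : Nat) : Int) = ((j % 5 : Nat) : Int) := by
      have h5 : ((pvBaseRoles.length : Nat) : Int) = ((5 : Nat) : Int) := by decide
      rw [h5]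
      exact PySem.Int.mod_natCast j 5
    simp only [Function.comp_apply]
    rw [hmod, PySem.List.pyGetD_natCast]

lemma pvModel_take (a b : Nat) (h : a ≤ b) : (pvModel b).take a = pvModel a := by
  unfold pvModel
  rw [← List.map_take, List.take_range]
  simp [Nat.min_eq_left h]

lemma pvB_model (n : Int) : default_personas_alt n = pvModel n.toNat := by
  simp only [default_personas_alt]
  rcases (show n < 0 ∨ 0 ≤ n by omega) with h | h
  · have hreps : (PySem.Int.floordiv n (pvBaseRoles.length : Int) + 1).toNat = 0 := by
      have h5 : (0:Int) < (pvBaseRoles.length : Int) := by simp [pvBaseRoles]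
      have hlen : (pvBaseRoles.length : Int) = 5 := by decide
      have hfm := PySem.Int.floordiv_mul_add_mod n (pvBaseRoles.length : Int)
      have hm1 : 0 ≤ PySem.Int.mod n (pvBaseRoles.length : Int) := PySem.Int.mod_nonneg n (by decide)
      have hm2 : PySem.Int.mod n (pvBaseRoles.length : Int) < (pvBaseRoles.length : Int) := PySem.Int.mod_lt n (by decide)
      rw [hlen] at hfm hm1 hm2 ⊢
      rw [Int.toNat_eq_zero]
      omega
    have hn : n.toNat = 0 := by omega
    simp [hreps, hn, pvModel, PySem.List.slice]
  · obtain ⟨m, rfl⟩ : ∃ m : Nat, n = (m : Int) := ⟨n.toNat, by omega⟩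
    have hfl : PySem.Int.floordiv (m : Int) ((pvBaseRoles.length : Nat) : Int) = ((m / 5 : Nat) : Int) := by
      have h5 : ((pvBaseRoles.length : Nat) : Int) = ((5 : Nat) : Int) := by decide
      rw [h5]
      exact PySem.Int.floordiv_natCast m 5
    rw [hfl]
    have h1 : ((m / 5 : Nat) : Int) + 1 = (((m / 5 + 1 : Nat)) : Int) := by push_cast; ring
    rw [h1, Int.toNat_natCast, pvTile, PySem.List.slice_to_natCast, Int.toNat_natCast]
    exact pvModel_take m (5 * (m / 5 + 1)) (by omega)

-- ===== VERDICT (by name: the statement is the Claim_ definition above) =====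
theorem default_personas_spec : Claim_equal_default_personas := by
  intro n _
  unfold Spec_default_personas
  rw [pvA_model, pvB_model]
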